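-- pv_equiv track=rewrite | github.com/akos5858/bsc_prog | python/hf/hf3.py | max_prod
-- ===== SOURCE A (Python) =====
-- def max_prod(lst : list, k : int) -> float:
--     "megkeresi egy lista azt a k hosszú részsorozatát, mely elemeinek szorzata maximális"
--     prods = 1
--     max_prod_yet = 1
--     if max(lst) == 0 and min(lst) >= 0:
--         max_prod_yet = 0
--         return max_prod_yet
--     else:
--         for i in range(0, len(lst)-k+1):
--             for x in lst[i: k+i]:
--                 prods *= x
--             if prods > max_prod_yet:
--                 max_prod_yet = prods
--             prods = 1
--     return max_prod_yet
-- ===== SOURCE B (Python) =====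
-- def max_prod(lst, k):
--     "megkeresi egy lista azt a k hosszu reszsorozatat, mely elemeinek szorzata maximalis"
--     if all(x == 0 for x in lst):
--         return 0
--     best = 1
--     prod = 1      # product of the nonzero elements of the current window
--     zeros = 0     # number of zeros in the current window
--     for i, x in enumerate(lst):
--         if x == 0:
--             zeros += 1
--         else:
--             prod *= x
--         if i >= k:
--             y = lst[i - k]
--             if y == 0:
--                 zeros -= 1
--             else:
--                 prod //= y
--         if i >= k - 1 and zeros == 0 and prod > best:
--             best = prod
--     return best
-- ===== Notes on version B (the rewrite author's own statement) =====
-- stated objective: faster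
-- what changed: A recomputes each length-k window product from scratch with an inner loop; B does a single sliding-window pass maintaining the product of the window's nonzero elements and a zero counter (dividing out the element that leaves), so the inner scan disappears.
-- outside the precondition, e.g. on max_prod([2, 3, -1], -1): A returns 6, B raises IndexError
import Mathlib
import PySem

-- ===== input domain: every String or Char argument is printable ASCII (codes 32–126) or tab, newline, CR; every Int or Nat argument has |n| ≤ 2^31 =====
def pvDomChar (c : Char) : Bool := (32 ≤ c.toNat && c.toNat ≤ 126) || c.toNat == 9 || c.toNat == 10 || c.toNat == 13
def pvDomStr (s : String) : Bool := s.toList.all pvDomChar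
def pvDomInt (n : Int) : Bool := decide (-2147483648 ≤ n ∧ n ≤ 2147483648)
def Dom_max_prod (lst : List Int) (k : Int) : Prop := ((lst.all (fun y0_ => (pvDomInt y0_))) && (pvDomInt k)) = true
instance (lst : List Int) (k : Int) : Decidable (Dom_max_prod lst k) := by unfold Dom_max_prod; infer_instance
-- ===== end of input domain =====

-- B replaces A's per-window inner loop by one sliding-window pass (product of the
-- window's nonzero elements plus a zero counter); equal on Pre_ (nonempty lst, k ≥ 1).

-- ===== PORT A =====
-- product of the window lst[i : k+i], as A's inner loop computes it
def aWinProd (lst : List Int) (k : Int) (i : Int) : Int :=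
  (PySem.List.slice lst (some i) (some (k + i))).foldl (fun a x => a * x) 1

-- A's outer loop: for i in range(0, bound): recompute the window product, keep the max
def aLoop (lst : List Int) (k : Int) (bound : Int) : Int :=
  (PySem.List.pyRange 0 bound 1).foldl
    (fun m i => let p := aWinProd lst k i; if p > m then p else m) 1

def max_prod (lst : List Int) (k : Int) : Int :=
  match PySem.List.max? lst (fun x => x), PySem.List.min? lst (fun x => x) with
  | some mx, some mn =>
      if mx = 0 ∧ 0 ≤ mn then 0
      else aLoop lst k ((lst.length : Int) - k + 1)
  | _, _ => 1   -- unreachable under Pre_: Python's max([]) raises ValueError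

-- ===== PORT B =====
-- one step of B's loop: state = (best, prod, zeros), iv = (i, x) from enumerate(lst)
def bStep (lst : List Int) (k : Int) (st : Int × Int × Int) (iv : Int × Int) : Int × Int × Int :=
  let best := st.1; let prod := st.2.1; let zeros := st.2.2
  let i := iv.1; let x := iv.2
  let pz := if x = 0 then (prod, zeros + 1) else (prod * x, zeros)
  let pz := if k ≤ i then
      (let y := PySem.List.pyGetD lst (i - k) 0
       if y = 0 then (pz.1, pz.2 - 1) else (PySem.Int.floordiv pz.1 y, pz.2))
    else pz
  let best := if k - 1 ≤ i ∧ pz.2 = 0 ∧ best < pz.1 then pz.1 else best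
  (best, pz.1, pz.2)

def max_prod_alt (lst : List Int) (k : Int) : Int :=
  if lst.all (fun x => x == 0) then 0
  else ((PySem.List.enumerate lst).foldl (bStep lst k) (1, 1, 0)).1

-- ===== PRECONDITION & SPEC =====
-- Pre_ excludes the empty list (A's max([]) raises ValueError) and negative k on lists
-- with a nonzero element, outside the natural domain of "length-k window": there B's
-- lst[i-k] lookup raises IndexError while A returns products of accidental
-- negative-stop slices.
def Pre_max_prod (lst : List Int) (k : Int) : Prop :=
  lst ≠ [] ∧ (0 ≤ k ∨ ∀ x ∈ lst, x = 0)
instance (lst : List Int) (k : Int) : Decidable (Pre_max_prod lst k) := by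
  unfold Pre_max_prod; infer_instance
def pvWitness_max_prod : List Int × Int := ([2, 0, -3], 2)

def Spec_max_prod (lst : List Int) (k : Int) (out : Int) : Prop := out = max_prod_alt lst k
instance (lst : List Int) (k : Int) (out : Int) : Decidable (Spec_max_prod lst k out) := by
  unfold Spec_max_prod; infer_instance

-- ===== CLAIM (what is proved, stated in full; the proofs are below) =====
def Claim_equal_max_prod : Prop := ∀ (lst : List Int) (k : Int),
  Dom_max_prod lst k → Pre_max_prod lst k → Spec_max_prod lst k (max_prod lst k)

-- ===== LEMMAS AND PROOFS =====

-- product of the nonzero elements of a window (the value B's `prod` maintains)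
def prodNZ (w : List Int) : Int := (w.filter (fun x => decide (x ≠ 0))).prod

-- the window B's state describes after the first m elements were processed
def win (lst : List Int) (K m : Nat) : List Int := (lst.take m).drop (m - K)

lemma prodNZ_append_zero (w : List Int) : prodNZ (w ++ [0]) = prodNZ w := by
  simp [prodNZ]

lemma prodNZ_append_nz (w : List Int) (x : Int) (hx : x ≠ 0) :
    prodNZ (w ++ [x]) = prodNZ w * x := by
  simp [prodNZ, hx]

lemma prodNZ_cons_zero (w : List Int) : prodNZ (0 :: w) = prodNZ w := by
  simp [prodNZ]

lemma prodNZ_cons_nz (w : List Int) (y : Int) (hy : y ≠ 0) :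
    prodNZ (y :: w) = y * prodNZ w := by
  simp [prodNZ, hy]

-- a list's product is its nonzero product, unless it contains a zero
lemma prod_eq_prodNZ (w : List Int) :
    w.prod = if w.count 0 = 0 then prodNZ w else 0 := by
  induction w with
  | nil => rfl
  | cons a w ih =>
    by_cases ha : a = 0
    · subst ha; simp
    · rw [List.prod_cons, ih, prodNZ_cons_nz w a ha, List.count_cons]
      by_cases h : w.count 0 = 0 <;> simp [ha, h]

-- A's window product at a natural start index j
lemma aWinProd_natCast (lst : List Int) (K : Nat) (j : Nat) :
    aWinProd lst (K : Int) (j : Int) = ((lst.drop j).take K).prod := by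
  unfold aWinProd
  rw [show ((K : Int) + (j : Int)) = ((j : Int) + (K : Int)) by ring,
      PySem.List.slice_natCast_add, List.prod_eq_foldl]

lemma aLoop_nonpos (lst : List Int) (k b : Int) (hb : b ≤ 0) : aLoop lst k b = 1 := by
  unfold aLoop
  rw [PySem.List.pyRange_one_eq_nil hb]
  rfl

lemma aLoop_succ (lst : List Int) (k b : Int) (hb : 0 ≤ b) :
    aLoop lst k (b + 1) =
      (let p := aWinProd lst k b; if p > aLoop lst k b then p else aLoop lst k b) := by
  unfold aLoop
  rw [PySem.List.pyRange_one_succ_right hb, List.foldl_append]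
  rfl

lemma le_foldl_maxstep (f : Int → Int) (l : List Int) (init : Int) :
    init ≤ l.foldl (fun m i => let p := f i; if p > m then p else m) init := by
  induction l generalizing init with
  | nil => simp
  | cons a l ih =>
    rw [List.foldl_cons]
    refine le_trans ?_ (ih _)
    dsimp only
    split <;> omega

lemma one_le_aLoop (lst : List Int) (k b : Int) : 1 ≤ aLoop lst k b := by
  unfold aLoop
  exact le_foldl_maxstep _ _ 1

-- the full window starting at j, as win sees it
lemma win_full (lst : List Int) (K m : Nat) (hK : K ≤ m) (_hm : m ≤ lst.length) :
    win lst K m = (lst.drop (m - K)).take K := by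
  unfold win
  rw [List.drop_take]
  congr 1
  omega

lemma take_succ_eq (l : List Int) (n : Nat) (h : n < l.length) :
    l.take (n+1) = l.take n ++ [l[n]] := by
  rw [List.take_add_one]; simp [List.getElem?_eq_getElem h]

lemma win_succ_small (lst : List Int) (K m : Nat) (h : m < K) (hm : m < lst.length) :
    win lst K (m+1) = win lst K m ++ [lst[m]] := by
  unfold win
  rw [show m + 1 - K = 0 by omega, show m - K = 0 by omega, List.drop_zero, List.drop_zero,
      take_succ_eq lst m hm]

lemma win_succ_big (lst : List Int) (K m : Nat) (_hK : 1 ≤ K) (h : K ≤ m) (hm : m < lst.length) :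
    win lst K m ++ [lst[m]] = lst[m - K]'(by omega) :: win lst K (m+1) := by
  unfold win
  rw [take_succ_eq lst m hm, List.drop_append_of_le_length (by simp; omega),
      show m + 1 - K = (m - K) + 1 by omega,
      List.drop_eq_getElem_cons (l := lst.take m) (i := m - K) (by simp; omega)]
  simp [List.getElem_take]

lemma count_append_singleton (w : List Int) (x v : Int) :
    (w ++ [x]).count v = w.count v + (if x = v then 1 else 0) := by
  by_cases h : x = v
  · subst h; simp [List.count_append]
  · simp [List.count_append, h]


-- the best-update of one B step equals extending A's running loop by one window
lemma best_step (lst : List Int) (K : Nat) (_hK : 1 ≤ K) (m : Nat) (hm : m + 1 ≤ lst.length)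
    (P Z : Int) (hP : P = prodNZ (win lst K (m+1)))
    (hZ : Z = ((win lst K (m+1)).count 0 : Int)) :
    (if (K : Int) - 1 ≤ (m : Int) ∧ Z = 0 ∧ aLoop lst (K : Int) ((m : Int) - (K : Int) + 1) < P
      then P else aLoop lst (K : Int) ((m : Int) - (K : Int) + 1))
    = aLoop lst (K : Int) (((m : Int) + 1) - (K : Int) + 1) := by
  by_cases hc1 : (K : Int) - 1 ≤ (m : Int)
  · have hb0 : (0 : Int) ≤ (m : Int) - (K : Int) + 1 := by omega
    have hbm1 : ((m : Int) + 1) - (K : Int) + 1 = ((m : Int) - (K : Int) + 1) + 1 := by ring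
    have hbi : (m : Int) - (K : Int) + 1 = ((m + 1 - K : Nat) : Int) := by
      rw [Nat.cast_sub (by omega)]; push_cast; ring
    have hwp : aWinProd lst (K : Int) ((m : Int) - (K : Int) + 1)
        = (if (win lst K (m+1)).count 0 = 0 then prodNZ (win lst K (m+1)) else 0) := by
      rw [hbi, aWinProd_natCast, ← win_full lst K (m+1) (by omega) hm, prod_eq_prodNZ]
    rw [hbm1, aLoop_succ lst (K : Int) _ hb0, hwp]
    by_cases hz : (win lst K (m+1)).count 0 = 0
    · rw [if_pos hz]
      by_cases hgt : aLoop lst (K : Int) ((m : Int) - (K : Int) + 1) < P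
      · rw [if_pos ⟨hc1, by rw [hZ]; exact_mod_cast congrArg (Nat.cast (R := Int)) hz, hgt⟩,
            hP, if_pos (by rw [← hP]; exact hgt)]
      · rw [if_neg (by tauto), if_neg (by rw [← hP]; exact hgt)]
    · have hno : ¬ ((0 : Int) > aLoop lst (K : Int) ((m : Int) - (K : Int) + 1)) := by
        have := one_le_aLoop lst (K : Int) ((m : Int) - (K : Int) + 1); omega
      rw [if_neg hz, if_neg hno, if_neg (by
        intro h
        exact hz (by rw [hZ] at h; exact_mod_cast h.2.1))]
  · rw [if_neg (by tauto), aLoop_nonpos lst (K : Int) _ (by omega),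
        aLoop_nonpos lst (K : Int) _ (by omega)]

-- one loop step of B, expressed on the invariant state
lemma bStep_eq (lst : List Int) (K : Nat) (hK : 1 ≤ K) (m : Nat) (hm : m < lst.length) :
    bStep lst (K : Int)
      (aLoop lst (K : Int) ((m : Int) - (K : Int) + 1),
       prodNZ (win lst K m), ((win lst K m).count 0 : Int)) ((m : Int), lst[m])
    = (aLoop lst (K : Int) (((m : Int) + 1) - (K : Int) + 1),
       prodNZ (win lst K (m+1)), ((win lst K (m+1)).count 0 : Int)) := by
  unfold bStep
  dsimp only
  by_cases hKm : (K : Int) ≤ (m : Int)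
  · -- window is full and slides: the element lst[m-K] leaves
    have hKm' : K ≤ m := by exact_mod_cast hKm
    have hy : PySem.List.pyGetD lst ((m : Int) - (K : Int)) 0 = lst[m - K]'(by omega) := by
      rw [show (m : Int) - (K : Int) = ((m - K : Nat) : Int) by rw [Nat.cast_sub hKm'],
          PySem.List.pyGetD_natCast, List.getD_eq_getElem lst 0 (by omega)]
    have hsplit : win lst K m ++ [lst[m]] = lst[m - K]'(by omega) :: win lst K (m+1) :=
      win_succ_big lst K m hK hKm' hm
    have hp := congrArg prodNZ hsplit
    have hc := congrArg (fun l => l.count 0) hsplit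
    dsimp only at hc
    rw [if_pos hKm, hy]
    by_cases hx : lst[m] = 0
    · rw [if_pos hx]
      dsimp only
      rw [hx, prodNZ_append_zero] at hp
      rw [hx, count_append_singleton, if_pos rfl] at hc
      by_cases hy0 : lst[m - K]'(by omega) = 0
      · rw [if_pos hy0]
        dsimp only
        rw [hy0, prodNZ_cons_zero] at hp
        rw [hy0, List.count_cons] at hc
        simp at hc
        have hZ' : ((win lst K m).count 0 : Int) + 1 - 1 = ((win lst K (m+1)).count 0 : Int) := by
          omega
        rw [hp, hZ', best_step lst K hK m (by omega) _ _ rfl rfl]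
      · rw [if_neg hy0]
        dsimp only
        rw [prodNZ_cons_nz _ _ hy0] at hp
        rw [List.count_cons, if_neg (by simp [hy0])] at hc
        have hZ' : ((win lst K m).count 0 : Int) + 1 = ((win lst K (m+1)).count 0 : Int) := by
          omega
        rw [hp, PySem.Int.floordiv, Int.mul_fdiv_cancel_left _ hy0, hZ',
            best_step lst K hK m (by omega) _ _ rfl rfl]
    · rw [if_neg hx]
      dsimp only
      rw [prodNZ_append_nz _ _ hx] at hp
      rw [count_append_singleton, if_neg hx] at hc
      by_cases hy0 : lst[m - K]'(by omega) = 0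
      · rw [if_pos hy0]
        dsimp only
        rw [hy0, prodNZ_cons_zero] at hp
        rw [hy0, List.count_cons] at hc
        simp at hc
        have hZ' : ((win lst K m).count 0 : Int) - 1 = ((win lst K (m+1)).count 0 : Int) := by
          omega
        rw [hp, hZ', best_step lst K hK m (by omega) _ _ rfl rfl]
      · rw [if_neg hy0]
        dsimp only
        rw [prodNZ_cons_nz _ _ hy0] at hp
        rw [List.count_cons, if_neg (by simp [hy0])] at hc
        have hZ' : ((win lst K m).count 0 : Int) = ((win lst K (m+1)).count 0 : Int) := by
          omega
        rw [hp, PySem.Int.floordiv, Int.mul_fdiv_cancel_left _ hy0, hZ',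
            best_step lst K hK m (by omega) _ _ rfl rfl]
  · -- window still growing: nothing leaves
    have hKm' : m < K := by omega
    have hsmall : win lst K m ++ [lst[m]] = win lst K (m+1) :=
      (win_succ_small lst K m hKm' hm).symm
    have hp := congrArg prodNZ hsmall
    have hc := congrArg (fun l => l.count 0) hsmall
    dsimp only at hc
    rw [if_neg hKm]
    by_cases hx : lst[m] = 0
    · rw [if_pos hx]
      dsimp only
      rw [hx, prodNZ_append_zero] at hp
      rw [hx, count_append_singleton, if_pos rfl] at hc
      have hZ' : ((win lst K m).count 0 : Int) + 1 = ((win lst K (m+1)).count 0 : Int) := by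
        omega
      rw [hp, hZ', best_step lst K hK m (by omega) _ _ rfl rfl]
    · rw [if_neg hx]
      dsimp only
      rw [prodNZ_append_nz _ _ hx] at hp
      rw [count_append_singleton, if_neg hx] at hc
      have hZ' : ((win lst K m).count 0 : Int) = ((win lst K (m+1)).count 0 : Int) := by
        omega
      rw [hp, hZ', best_step lst K hK m (by omega) _ _ rfl rfl]

-- MAIN INVARIANT: after the first m elements, B's state is
-- (A's running max over the windows ending before m, prodNZ of the window, its zero count)
lemma loop_inv (lst : List Int) (K : Nat) (hK : 1 ≤ K) (m : Nat) (hm : m ≤ lst.length) :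
    (PySem.List.enumerate (lst.take m)).foldl (bStep lst (K : Int)) (1, 1, 0)
      = (aLoop lst (K : Int) ((m : Int) - (K : Int) + 1),
         prodNZ (win lst K m), ((win lst K m).count 0 : Int)) := by
  induction m with
  | zero =>
    rw [List.take_zero, aLoop_nonpos lst (K : Int) _ (by push_cast; omega)]
    simp [win, prodNZ, PySem.List.enumerate_nil]
  | succ m ih =>
    have hm' : m < lst.length := by omega
    rw [take_succ_eq lst m hm', PySem.List.enumerate_append, List.foldl_append, ih (by omega),
        PySem.List.enumerate_cons, PySem.List.enumerate_nil]
    simp only [List.foldl_cons, List.foldl_nil]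
    have hs : (0 : Int) + ((lst.take m).length : Int) = (m : Int) := by
      simp [List.length_take, Nat.min_eq_left (le_of_lt hm')]
    rw [hs, bStep_eq lst K hK m hm']
    push_cast
    ring_nf

-- k = 0: every window is empty, A's loop keeps 1 and B's state never moves
lemma aWinProd_zero_k (lst : List Int) (i : Int) : aWinProd lst 0 i = 1 := by
  unfold aWinProd
  have h : PySem.List.slice lst (some i) (some (0 + i)) = [] := by
    rw [zero_add]
    apply List.eq_nil_of_length_eq_zero
    rw [PySem.List.length_slice]
    omega
  rw [h]
  rfl

lemma aLoop_zero_k (lst : List Int) (b : Int) : aLoop lst 0 b = 1 := by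
  unfold aLoop
  generalize PySem.List.pyRange 0 b 1 = l
  induction l with
  | nil => rfl
  | cons i l ih =>
    rw [List.foldl_cons]
    dsimp only
    rw [aWinProd_zero_k, if_neg (by omega)]
    exact ih

lemma bLoop_zero_k (lst : List Int) (l : List (Int × Int))
    (h : ∀ p ∈ l, 0 ≤ p.1 ∧ PySem.List.pyGetD lst (p.1 - 0) 0 = p.2) :
    l.foldl (bStep lst 0) (1, 1, 0) = (1, 1, 0) := by
  induction l with
  | nil => rfl
  | cons p l ih =>
    obtain ⟨hp1, hp2⟩ := h p (by simp)
    have hstep : bStep lst 0 (1, 1, 0) p = (1, 1, 0) := by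
      unfold bStep
      dsimp only
      rw [if_pos hp1, hp2]
      by_cases hx : p.2 = 0
      · rw [if_pos hx, if_pos hx]
        dsimp only
        rw [if_neg (by omega)]
        norm_num
      · rw [if_neg hx]
        dsimp only
        rw [if_neg hx, show (1 : Int) * p.2 = p.2 * 1 by ring, PySem.Int.floordiv,
            Int.mul_fdiv_cancel_left _ hx, if_neg (by omega)]
    rw [List.foldl_cons, hstep]
    exact ih (fun q hq => h q (by simp [hq]))

-- ===== VERDICT (by name: the statement is the Claim_ definition above) =====
theorem max_prod_spec : Claim_equal_max_prod := by
  intro lst k _ hpre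
  obtain ⟨hne, hk⟩ := hpre
  unfold Spec_max_prod
  obtain ⟨mx, hmx⟩ : ∃ mx, PySem.List.max? lst (fun x => x) = some mx := by
    cases h : PySem.List.max? lst (fun x => x) with
    | none => exact absurd ((PySem.List.max?_eq_none_iff _ _).mp h) hne
    | some mx => exact ⟨mx, rfl⟩
  obtain ⟨mn, hmn⟩ : ∃ mn, PySem.List.min? lst (fun x => x) = some mn := by
    cases h : PySem.List.min? lst (fun x => x) with
    | none => exact absurd ((PySem.List.min?_eq_none_iff _ _).mp h) hne
    | some mn => exact ⟨mn, rfl⟩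
  have hall : (mx = 0 ∧ 0 ≤ mn) ↔ (lst.all (fun x => x == 0) = true) := by
    constructor
    · rintro ⟨h0, hmn0⟩
      rw [List.all_eq_true]
      intro x hx
      have h1 := PySem.List.max?_isMax hmx x hx
      have h2 := PySem.List.min?_isMin hmn x hx
      simp only [h0] at h1
      simp only [beq_iff_eq]
      omega
    · intro h
      rw [List.all_eq_true] at h
      have h1 := h mx (PySem.List.max?_mem hmx)
      have h2 := h mn (PySem.List.min?_mem hmn)
      simp only [beq_iff_eq] at h1 h2
      omega
  simp only [max_prod, max_prod_alt, hmx, hmn]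
  by_cases hz : mx = 0 ∧ 0 ≤ mn
  · rw [if_pos hz, if_pos (hall.mp hz)]
  · rw [if_neg hz, if_neg (fun hh => hz (hall.mpr hh))]
    have hk0 : 0 ≤ k := by
      rcases hk with hk | hall0
      · exact hk
      · exact absurd (hall.mpr (List.all_eq_true.mpr
          (fun x hx => beq_iff_eq.mpr (hall0 x hx)))) hz
    by_cases hkz : k = 0
    · subst hkz
      rw [aLoop_zero_k, bLoop_zero_k lst _ (by
        intro p hp
        rw [PySem.List.mem_enumerate_iff] at hp
        obtain ⟨j, hj, rfl⟩ := hp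
        refine ⟨by positivity, ?_⟩
        rw [show (0 : Int) + (j : Int) - 0 = ((j : Nat) : Int) by ring,
            PySem.List.pyGetD_natCast, List.getD_eq_getElem lst 0 hj])]
    have hk1 : 1 ≤ k := by omega
    have hKk : ((k.toNat : Nat) : Int) = k := Int.toNat_of_nonneg (by omega)
    have hinv := loop_inv lst k.toNat (by omega) lst.length le_rfl
    rw [List.take_length, hKk] at hinv
    rw [hinv]
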